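-- pv_equiv track=rewrite | github.com/asters36/TidyTool | Libraries/fasta_utils.py | remove_duplicate_sequences
-- ===== SOURCE A (Python) =====
-- def remove_duplicate_sequences(fasta_lines):
--     """
--     Usuwa duplikaty sekwencji z danych FASTA.
--     Zwraca listę unikalnych (header, sequence).
--     """
--     from itertools import groupby
--
--     records = []
--     current_header = None
--     current_sequence = []
--
--     for line in fasta_lines:
--         line = line.strip()
--         if line.startswith(">"):
--             if current_header:
--                 records.append((current_header, "".join(current_sequence)))
--             current_header = line
--             current_sequence = []
--         else:
--             current_sequence.append(line)
--
--     if current_header: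
--         records.append((current_header, "".join(current_sequence)))
--
--     seen = set()
--     unique_records = []
--     for header, seq in records:
--         key = seq.upper().replace(" ", "")  # normalizacja
--         if key not in seen:
--             seen.add(key)
--             unique_records.append((header, seq))
--
--     return unique_records
-- ===== SOURCE B (Python) =====
-- def remove_duplicate_sequences(fasta_lines):
--     """
--     Back-to-front parse: walking the lines in reverse, a record's sequence is the
--     run of non-header lines already collected below its header, so no
--     current_header state machine is needed; dedup is positional, keeping a
--     record exactly when the first occurrence of its normalized key (a map from
--     key to first index) is its own position -- no seen set.
--     """
--     records_rev = []
--     tail = []  # sequence lines below the cursor, collected in reverse order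
--     for raw in reversed(fasta_lines):
--         line = raw.strip()
--         if line.startswith(">"):
--             records_rev.append((line, "".join(reversed(tail))))
--             tail = []
--         else:
--             tail.append(line)
--     records = records_rev[::-1]
--     keys = [seq.upper().replace(" ", "") for _, seq in records]
--     first = {}
--     for i, key in enumerate(keys):
--         first.setdefault(key, i)
--     return [rec for i, (rec, key) in enumerate(zip(records, keys)) if first[key] == i]
-- ===== Notes on version B (the rewrite author's own statement) =====
-- stated objective: alternative
-- what changed: B parses by a single backward traversal (a record's sequence is the run of non-header lines already collected below its header, so A's current_header/current_sequence state machine disappears) and deduplicates positionally, keeping a record iff a first-occurrence-index map sends its normalized key to its own position, instead of A's seen-set filter.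
import Mathlib
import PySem

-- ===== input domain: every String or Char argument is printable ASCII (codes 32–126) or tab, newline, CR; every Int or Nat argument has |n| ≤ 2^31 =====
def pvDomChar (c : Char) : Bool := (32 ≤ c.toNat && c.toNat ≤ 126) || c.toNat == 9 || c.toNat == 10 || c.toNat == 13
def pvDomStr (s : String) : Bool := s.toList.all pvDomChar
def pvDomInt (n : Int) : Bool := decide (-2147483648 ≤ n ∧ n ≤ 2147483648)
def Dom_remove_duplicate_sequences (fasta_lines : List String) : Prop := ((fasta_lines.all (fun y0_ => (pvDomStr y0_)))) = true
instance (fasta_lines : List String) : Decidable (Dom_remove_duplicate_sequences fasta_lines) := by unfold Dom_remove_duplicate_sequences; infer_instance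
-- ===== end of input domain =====

-- B parses by one backward traversal (no header/sequence state machine) and dedups by first-occurrence index (list.index) instead of a seen set; alternative decomposition, same result.


-- key = seq.upper().replace(" ", "")  (the normalization both programs share)
def pvKey (seq : String) : String := PySem.Str.replace (PySem.Str.upper seq) " " ""

-- Python truthiness of `current_header` (None or a str); A's `if current_header:`
def pvTruthy (o : Option String) : Bool :=
  match o with
  | none => false
  | some s => !s.toList.isEmpty

-- ===== PORT A =====
-- A, pass 1: for line in fasta_lines: strip; header? flush record into `records`; else accumulate line
def pvParseStep (st : List (String × String) × Option String × List String) (line0 : String) :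
    List (String × String) × Option String × List String :=
  let line := PySem.Str.strip line0
  if PySem.Str.startswith line ">" then
    if pvTruthy st.2.1 then
      (st.1 ++ [(st.2.1.getD "", PySem.Str.join "" st.2.2)], some line, [])
    else (st.1, some line, [])
  else (st.1, st.2.1, st.2.2 ++ [line])

-- A, pass 2: keep a record iff its key is not in the `seen` set yet
def pvDedupStep (acc : PySem.Set String × List (String × String)) (r : String × String) :
    PySem.Set String × List (String × String) :=
  let key := pvKey r.2
  if PySem.Set.contains acc.1 key then acc
  else (PySem.Set.add acc.1 key, acc.2 ++ [r])

def remove_duplicate_sequences (fasta_lines : List String) : List (String × String) :=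
  let st := fasta_lines.foldl pvParseStep ([], none, [])
  let records :=
    if pvTruthy st.2.1 then st.1 ++ [(st.2.1.getD "", PySem.Str.join "" st.2.2)] else st.1
  (records.foldl pvDedupStep (PySem.Set.empty, [])).2

-- ===== PORT B =====
-- B's backward pass: on a header emit (header, join(tail below it)), else prepend the line to the tail
def pvRevStep (st : List (String × String) × List String) (raw : String) :
    List (String × String) × List String :=
  let line := PySem.Str.strip raw
  if PySem.Str.startswith line ">" then
    (st.1 ++ [(line, PySem.Str.join "" st.2.reverse)], [])   -- "".join(reversed(tail))
  else (st.1, st.2 ++ [line])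

def remove_duplicate_sequences_alt (fasta_lines : List String) : List (String × String) :=
  let st := fasta_lines.reverse.foldl pvRevStep ([], [])   -- for raw in reversed(fasta_lines)
  let records := st.1.reverse                              -- records_rev[::-1]
  let keys := records.map (fun r => pvKey r.2)
  let first := (PySem.List.enumerate keys 0).foldl         -- first.setdefault(key, i)
      (fun d p => PySem.Dict.setdefault d p.2 p.1) PySem.Dict.empty
  ((PySem.List.enumerate (records.zip keys) 0).filter
      (fun p => PySem.Dict.get? first p.2.2 == some p.1)).map (fun p => p.2.1)
      -- first[key] == i : every key is present in `first`, so d[key] is get?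

-- ===== PRECONDITION & SPEC =====
def Spec_remove_duplicate_sequences (fasta_lines : List String) (out : List (String × String)) : Prop := out = remove_duplicate_sequences_alt fasta_lines
instance (fasta_lines : List String) (out : List (String × String)) : Decidable (Spec_remove_duplicate_sequences fasta_lines out) := by unfold Spec_remove_duplicate_sequences; infer_instance

-- ===== CLAIM (what is proved, stated in full; the proofs are below) =====
def Claim_equal_remove_duplicate_sequences : Prop := ∀ (fasta_lines : List String), Dom_remove_duplicate_sequences fasta_lines → Spec_remove_duplicate_sequences fasta_lines (remove_duplicate_sequences fasta_lines)

-- ===== LEMMAS AND PROOFS =====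

-- `line.strip().startswith(">")` — the header test both programs apply
def pvHdr (l : String) : Bool := PySem.Str.startswith (PySem.Str.strip l) ">"

-- A's end-of-loop flush of the pending (header, sequence) state
def pvFlushSt (st : List (String × String) × Option String × List String) :
    List (String × String) :=
  if pvTruthy st.2.1 then st.1 ++ [(st.2.1.getD "", PySem.Str.join "" st.2.2)] else st.1

-- document-order records of A's first pass (exactly the `records` let of the A port)
def pvRecsA (xs : List String) : List (String × String) :=
  pvFlushSt (xs.foldl pvParseStep ([], none, []))

-- the stripped leading run of non-header lines
def pvTail (xs : List String) : List String :=
  (xs.takeWhile (fun l => !pvHdr l)).map PySem.Str.strip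

-- result of B's backward pass
def pvRevRes (xs : List String) : List (String × String) × List String :=
  xs.reverse.foldl pvRevStep ([], [])

-- keep-iff-first-occurrence-index selection, phrased with list.index
def pvSelIdx (records : List (String × String)) : List (String × String) :=
  let keys := records.map (fun r => pvKey r.2)
  ((PySem.List.enumerate (records.zip keys) 0).filter
      (fun p => ((PySem.List.index? keys p.2.2).map (fun n => (n : Int))) == some p.1)).map
    (fun p => p.2.1)

-- B's first-occurrence map over the keys
def pvFirst (keys : List String) : PySem.Dict String Int :=
  (PySem.List.enumerate keys 0).foldl
    (fun d p => PySem.Dict.setdefault d p.2 p.1) PySem.Dict.empty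

-- B's dedup selection (exactly the tail of the B port)
def pvSelB (records : List (String × String)) : List (String × String) :=
  let keys := records.map (fun r => pvKey r.2)
  let first := (PySem.List.enumerate keys 0).foldl
      (fun d p => PySem.Dict.setdefault d p.2 p.1) PySem.Dict.empty
  ((PySem.List.enumerate (records.zip keys) 0).filter
      (fun p => PySem.Dict.get? first p.2.2 == some p.1)).map (fun p => p.2.1)

-- a header line is a nonempty string, hence truthy
theorem pvHdr_truthy (l : String) (h : pvHdr l = true) :
    pvTruthy (some (PySem.Str.strip l)) = true := by
  unfold pvHdr at h
  simp only [PySem.Str.startswith, PySem.Chars.startswith] at h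
  simp only [pvTruthy, Bool.not_eq_true']
  cases hcs : (PySem.Str.strip l).toList with
  | nil => rw [hcs] at h; simp at h
  | cons c cs => rfl

-- A's parse loop only appends to the records accumulator
theorem pvParse_acc (lines : List String) (recs : List (String × String))
    (h : Option String) (seqs : List String) :
    lines.foldl pvParseStep (recs, h, seqs) =
      (recs ++ (lines.foldl pvParseStep ([], h, seqs)).1,
       (lines.foldl pvParseStep ([], h, seqs)).2) := by
  induction lines generalizing recs h seqs with
  | nil => simp
  | cons l rest ih =>
    simp only [List.foldl_cons]
    by_cases hc : PySem.Str.startswith (PySem.Str.strip l) ">" = true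
    · by_cases ht : pvTruthy h = true
      · rw [show pvParseStep (recs, h, seqs) l
              = (recs ++ [(h.getD "", PySem.Str.join "" seqs)], some (PySem.Str.strip l), [])
              from by simp only [pvParseStep]; rw [if_pos hc, if_pos ht],
            show pvParseStep (([] : List (String × String)), h, seqs) l
              = ([(h.getD "", PySem.Str.join "" seqs)], some (PySem.Str.strip l), [])
              from by simp only [pvParseStep]; rw [if_pos hc, if_pos ht]; rfl]
        rw [ih (recs ++ [(h.getD "", PySem.Str.join "" seqs)]) (some (PySem.Str.strip l)) [],
            ih [(h.getD "", PySem.Str.join "" seqs)] (some (PySem.Str.strip l)) []]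
        rw [List.append_assoc]
      · rw [show pvParseStep (recs, h, seqs) l = (recs, some (PySem.Str.strip l), [])
              from by simp only [pvParseStep]; rw [if_pos hc, if_neg ht],
            show pvParseStep (([] : List (String × String)), h, seqs) l
              = ([], some (PySem.Str.strip l), [])
              from by simp only [pvParseStep]; rw [if_pos hc, if_neg ht]]
        exact ih recs (some (PySem.Str.strip l)) []
    · rw [show pvParseStep (recs, h, seqs) l = (recs, h, seqs ++ [PySem.Str.strip l])
            from by simp only [pvParseStep]; rw [if_neg hc],
          show pvParseStep (([] : List (String × String)), h, seqs) l
            = ([], h, seqs ++ [PySem.Str.strip l])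
            from by simp only [pvParseStep]; rw [if_neg hc]]
      exact ih recs h (seqs ++ [PySem.Str.strip l])

-- with no pending header, the initial sequence buffer cannot influence the records
theorem pvNoneSeqs (xs : List String) (s1 s2 : List String) :
    (xs.foldl pvParseStep ([], none, s1)).1 = (xs.foldl pvParseStep ([], none, s2)).1 ∧
    (xs.foldl pvParseStep ([], none, s1)).2.1 = (xs.foldl pvParseStep ([], none, s2)).2.1 ∧
    (pvTruthy (xs.foldl pvParseStep ([], none, s1)).2.1 = true →
      (xs.foldl pvParseStep ([], none, s1)).2.2 = (xs.foldl pvParseStep ([], none, s2)).2.2) := by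
  induction xs generalizing s1 s2 with
  | nil => exact ⟨rfl, rfl, fun ht => by simp [pvTruthy] at ht⟩
  | cons l rest ih =>
    simp only [List.foldl_cons]
    by_cases hc : PySem.Str.startswith (PySem.Str.strip l) ">" = true
    · have e : ∀ s : List String, pvParseStep ([], none, s) l
          = ([], some (PySem.Str.strip l), []) := by
        intro s; simp only [pvParseStep]; rw [if_pos hc]; rfl
      rw [e s1, e s2]
      exact ⟨rfl, rfl, fun _ => rfl⟩
    · have e : ∀ s : List String, pvParseStep ([], none, s) l
          = ([], none, s ++ [PySem.Str.strip l]) := by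
        intro s; simp only [pvParseStep]; rw [if_neg hc]
      rw [e s1, e s2]
      exact ih (s1 ++ [PySem.Str.strip l]) (s2 ++ [PySem.Str.strip l])

-- pvRecsA recursion: empty / leading junk / header
set_option maxHeartbeats 1000000 in
theorem pvRecsA_nil : pvRecsA [] = [] := rfl
set_option maxHeartbeats 1000000 in
theorem pvRecsA_cons_junk (l : String) (xs : List String) (h : pvHdr l = false) :
    pvRecsA (l :: xs) = pvRecsA xs := by
  have hc : ¬ PySem.Str.startswith (PySem.Str.strip l) ">" = true := by
    show ¬ pvHdr l = true
    simp [h]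
  unfold pvRecsA pvFlushSt
  simp only [List.foldl_cons]
  rw [show pvParseStep ([], none, []) l = ([], none, [PySem.Str.strip l])
      from by simp only [pvParseStep]; rw [if_neg hc]; rfl]
  obtain ⟨h1, h2, h3⟩ := pvNoneSeqs xs [PySem.Str.strip l] []
  rw [h2]
  by_cases ht : pvTruthy (xs.foldl pvParseStep ([], none, [])).2.1 = true
  · rw [if_pos ht, if_pos ht, h1, h3 (by rw [h2]; exact ht)]
  · rw [if_neg ht, if_neg ht, h1]
theorem pvTail_cons_hdr (l : String) (xs : List String) (h : pvHdr l = true) :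
    pvTail (l :: xs) = [] := by
  simp [pvTail, h]

theorem pvTail_cons_junk (l : String) (xs : List String) (h : pvHdr l = false) :
    pvTail (l :: xs) = PySem.Str.strip l :: pvTail xs := by
  simp [pvTail, h]

-- flushing after a records prefix was accumulated
theorem pvFlushSt_acc (rs : List (String × String))
    (st : List (String × String) × Option String × List String) :
    pvFlushSt (rs ++ st.1, st.2) = rs ++ pvFlushSt st := by
  unfold pvFlushSt
  by_cases ht : pvTruthy st.2.1 = true
  · rw [if_pos ht, if_pos ht, List.append_assoc]
  · rw [if_neg ht, if_neg ht]

-- running A's loop with a pending truthy header: the pending record comes first,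
-- absorbing the leading non-header run, and the rest is a fresh parse
set_option maxHeartbeats 1000000 in
theorem pvPending (xs : List String) (h : String) (seqs : List String)
    (hh : pvTruthy (some h) = true) :
    pvFlushSt (xs.foldl pvParseStep ([], some h, seqs)) =
      (h, PySem.Str.join "" (seqs ++ pvTail xs)) :: pvRecsA xs := by
  induction xs generalizing h seqs with
  | nil =>
    simp only [List.foldl_nil, pvFlushSt, pvTail, List.takeWhile_nil, List.map_nil,
      List.append_nil, pvRecsA_nil]
    rw [if_pos hh]
    rfl
  | cons l xs ih =>
    simp only [List.foldl_cons]
    by_cases hc : PySem.Str.startswith (PySem.Str.strip l) ">" = true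
    · rw [show pvParseStep ([], some h, seqs) l
          = ([(h, PySem.Str.join "" seqs)], some (PySem.Str.strip l), [])
          from by simp only [pvParseStep]; rw [if_pos hc, if_pos hh]; rfl]
      rw [pvParse_acc xs [(h, PySem.Str.join "" seqs)] (some (PySem.Str.strip l)) []]
      rw [pvFlushSt_acc [(h, PySem.Str.join "" seqs)]
            (xs.foldl pvParseStep ([], some (PySem.Str.strip l), []))]
      rw [pvTail_cons_hdr l xs hc, List.append_nil]
      rw [show pvRecsA (l :: xs)
          = pvFlushSt (xs.foldl pvParseStep ([], some (PySem.Str.strip l), []))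
          from by
            unfold pvRecsA
            simp only [List.foldl_cons]
            rw [show pvParseStep ([], none, []) l = ([], some (PySem.Str.strip l), [])
                from by simp only [pvParseStep]; rw [if_pos hc]; rfl]]
      rfl
    · rw [show pvParseStep ([], some h, seqs) l
          = ([], some h, seqs ++ [PySem.Str.strip l])
          from by simp only [pvParseStep]; rw [if_neg hc]]
      rw [ih h (seqs ++ [PySem.Str.strip l]) hh]
      rw [pvTail_cons_junk l xs (Bool.eq_false_iff.mpr hc),
          pvRecsA_cons_junk l xs (Bool.eq_false_iff.mpr hc)]
      rw [List.append_assoc, List.singleton_append]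

theorem pvRecsA_cons_hdr (l : String) (xs : List String) (h : pvHdr l = true) :
    pvRecsA (l :: xs) =
      (PySem.Str.strip l, PySem.Str.join "" (pvTail xs)) :: pvRecsA xs := by
  have hc : PySem.Str.startswith (PySem.Str.strip l) ">" = true := h
  unfold pvRecsA
  simp only [List.foldl_cons]
  rw [show pvParseStep ([], none, []) l = ([], some (PySem.Str.strip l), [])
      from by simp only [pvParseStep]; rw [if_pos hc]; rfl]
  rw [pvPending xs (PySem.Str.strip l) [] (pvHdr_truthy l h)]
  simp [pvRecsA]

-- B's backward pass consumes the FIRST line last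
theorem pvRevRes_cons (l : String) (xs : List String) :
    pvRevRes (l :: xs) = pvRevStep (pvRevRes xs) l := by
  unfold pvRevRes
  rw [List.reverse_cons, List.foldl_append]
  rfl

-- B's backward pass computes A's records reversed, plus the stripped leading junk reversed
theorem pvRevRes_char (xs : List String) :
    pvRevRes xs = ((pvRecsA xs).reverse, (pvTail xs).reverse) := by
  induction xs with
  | nil => simp [pvRevRes, pvRecsA_nil, pvTail]
  | cons l xs ih =>
    rw [pvRevRes_cons, ih]
    by_cases hc : pvHdr l = true
    · have hc2 : PySem.Str.startswith (PySem.Str.strip l) ">" = true := hc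
      rw [show pvRevStep ((pvRecsA xs).reverse, (pvTail xs).reverse) l
          = ((pvRecsA xs).reverse
              ++ [(PySem.Str.strip l, PySem.Str.join "" (pvTail xs).reverse.reverse)], [])
          from by simp only [pvRevStep]; rw [if_pos hc2]]
      rw [List.reverse_reverse, pvRecsA_cons_hdr l xs hc, pvTail_cons_hdr l xs hc,
          List.reverse_cons]
      rfl
    · have hc' : ¬ PySem.Str.startswith (PySem.Str.strip l) ">" = true := hc
      rw [show pvRevStep ((pvRecsA xs).reverse, (pvTail xs).reverse) l
          = ((pvRecsA xs).reverse, (pvTail xs).reverse ++ [PySem.Str.strip l])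
          from by simp only [pvRevStep]; rw [if_neg hc']]
      rw [pvRecsA_cons_junk l xs (Bool.eq_false_iff.mpr hc'),
          pvTail_cons_junk l xs (Bool.eq_false_iff.mpr hc'), List.reverse_cons]

-- the seen set after A's dedup pass holds exactly the keys of the processed records
theorem pvDedup_seen (rs : List (String × String)) (s : PySem.Set String)
    (out : List (String × String)) :
    (rs.foldl pvDedupStep (s, out)).1 = PySem.Set.update s (rs.map (fun r => pvKey r.2)) := by
  induction rs generalizing s out with
  | nil => rfl
  | cons r rs ih =>
    simp only [List.foldl_cons, List.map_cons, PySem.Set.update_cons]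
    by_cases hck : PySem.Set.contains s (pvKey r.2) = true
    · rw [show pvDedupStep (s, out) r = (s, out)
          from by simp only [pvDedupStep]; rw [if_pos hck]]
      rw [ih s out]
      rw [show PySem.Set.add s (pvKey r.2) = s
          from by simp only [PySem.Set.add]; rw [if_pos hck]]
    · rw [show pvDedupStep (s, out) r = (PySem.Set.add s (pvKey r.2), out ++ [r])
          from by simp only [pvDedupStep]; rw [if_neg hck]]
      rw [ih]

-- seen-set dedup = keep-iff-first-occurrence-index selection
set_option maxHeartbeats 1000000 in
theorem pvDedup_eq_selIdx (rs : List (String × String)) :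
    (rs.foldl pvDedupStep (PySem.Set.empty, [])).2 = pvSelIdx rs := by
  induction rs using List.reverseRecOn with
  | nil => rfl
  | append_singleton rs r ih =>
    have hlen : (rs.map (fun r => pvKey r.2)).length = rs.length := by
      simp
    have hlen' : rs.length = (rs.map (fun r => pvKey r.2)).length := hlen.symm
    have hzlen : (rs.zip (rs.map (fun r => pvKey r.2))).length = rs.length := by
      rw [List.length_zip, hlen, Nat.min_self]
    have hcongr : ∀ p ∈ PySem.List.enumerate (rs.zip (rs.map (fun r => pvKey r.2))) 0,
        (((PySem.List.index? (rs.map (fun r => pvKey r.2) ++ [pvKey r.2]) p.2.2).map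
            (fun n => (n : Int))) == some p.1)
          = (((PySem.List.index? (rs.map (fun r => pvKey r.2)) p.2.2).map
            (fun n => (n : Int))) == some p.1) := by
      intro p hp
      obtain ⟨j, hj, hpe⟩ := (PySem.List.mem_enumerate_iff _ _ _).mp hp
      have hp2 : p.2 ∈ rs.zip (rs.map (fun r => pvKey r.2)) := by
        rw [hpe]; exact List.getElem_mem hj
      have hk2 : p.2.2 ∈ rs.map (fun r => pvKey r.2) := (List.of_mem_zip hp2).2
      rw [PySem.List.index?_append_of_mem [pvKey r.2] hk2]
    have hstep : (rs ++ [r]).foldl pvDedupStep (PySem.Set.empty, [])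
        = pvDedupStep (rs.foldl pvDedupStep (PySem.Set.empty, [])) r := by
      rw [List.foldl_append, List.foldl_cons, List.foldl_nil]
    have hSelB : pvSelIdx (rs ++ [r])
        = (((PySem.List.enumerate (rs.zip (rs.map (fun r => pvKey r.2))) 0).filter
              (fun p => (((PySem.List.index? (rs.map (fun r => pvKey r.2)) p.2.2).map
                (fun n => (n : Int))) == some p.1))).map (fun p => p.2.1))
          ++ (([((0 : Int) + ↑(rs.zip (rs.map (fun r => pvKey r.2))).length, (r, pvKey r.2))].filter
              (fun p => (((PySem.List.index? (rs.map (fun r => pvKey r.2) ++ [pvKey r.2]) p.2.2).map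
                (fun n => (n : Int))) == some p.1))).map (fun p => p.2.1)) := by
      simp only [pvSelIdx, List.map_append, List.map_cons, List.map_nil]
      rw [List.zip_append hlen', show ([r].zip [pvKey r.2]) = [(r, pvKey r.2)] from rfl]
      rw [PySem.List.enumerate_append, PySem.List.enumerate_cons, PySem.List.enumerate_nil]
      rw [List.filter_append, List.map_append]
      rw [List.filter_congr hcongr]
    rw [hstep, hSelB]
    by_cases hmem : pvKey r.2 ∈ rs.map (fun r => pvKey r.2)
    · have hcon : PySem.Set.contains (rs.foldl pvDedupStep (PySem.Set.empty, [])).1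
          (pvKey r.2) = true := by
        rw [pvDedup_seen,
          show PySem.Set.update PySem.Set.empty (rs.map (fun r => pvKey r.2))
            = PySem.Set.ofList (rs.map (fun r => pvKey r.2)) from rfl]
        exact (PySem.Set.contains_iff _ _).mpr ((PySem.Set.mem_ofList _ _).mpr hmem)
      rw [show pvDedupStep (rs.foldl pvDedupStep (PySem.Set.empty, [])) r
          = rs.foldl pvDedupStep (PySem.Set.empty, [])
          from by simp only [pvDedupStep]; rw [if_pos hcon]]
      rw [ih]
      have hsome : (PySem.List.index? (rs.map (fun r => pvKey r.2)) (pvKey r.2)).isSome = true := by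
        rw [PySem.List.index?_isSome_iff]; exact hmem
      obtain ⟨j, hjeq⟩ := Option.isSome_iff_exists.mp hsome
      obtain ⟨hjlt, -, -⟩ := PySem.List.getElem_of_index?_eq_some hjeq
      have hpred : (((PySem.List.index? (rs.map (fun r => pvKey r.2) ++ [pvKey r.2])
            (pvKey r.2)).map (fun n => (n : Int)))
          == some ((0 : Int) + ↑(rs.zip (rs.map (fun r => pvKey r.2))).length)) = false := by
        rw [PySem.List.index?_append_of_mem [pvKey r.2] hmem, hjeq, hzlen]
        rw [hlen] at hjlt
        simp
        omega
      rw [show ([((0 : Int) + ↑(rs.zip (rs.map (fun r => pvKey r.2))).length, (r, pvKey r.2))].filter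
            (fun p => (((PySem.List.index? (rs.map (fun r => pvKey r.2) ++ [pvKey r.2]) p.2.2).map
              (fun n => (n : Int))) == some p.1)))
          = [] from by rw [List.filter_cons]; rw [hpred]; rfl]
      simp only [List.map_nil, List.append_nil]
      rfl
    · have hcon : PySem.Set.contains (rs.foldl pvDedupStep (PySem.Set.empty, [])).1
          (pvKey r.2) = false := by
        rw [pvDedup_seen,
          show PySem.Set.update PySem.Set.empty (rs.map (fun r => pvKey r.2))
            = PySem.Set.ofList (rs.map (fun r => pvKey r.2)) from rfl]
        rw [Bool.eq_false_iff]
        intro hcontra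
        exact hmem ((PySem.Set.mem_ofList _ _).mp ((PySem.Set.contains_iff _ _).mp hcontra))
      rw [show pvDedupStep (rs.foldl pvDedupStep (PySem.Set.empty, [])) r
          = (PySem.Set.add (rs.foldl pvDedupStep (PySem.Set.empty, [])).1 (pvKey r.2),
             (rs.foldl pvDedupStep (PySem.Set.empty, [])).2 ++ [r])
          from by simp only [pvDedupStep]; rw [if_neg (by rw [hcon]; exact Bool.false_ne_true)]]
      rw [ih]
      have hpred : (((PySem.List.index? (rs.map (fun r => pvKey r.2) ++ [pvKey r.2])
            (pvKey r.2)).map (fun n => (n : Int)))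
          == some ((0 : Int) + ↑(rs.zip (rs.map (fun r => pvKey r.2))).length)) = true := by
        rw [PySem.List.index?_append_singleton_self _ _ hmem, hzlen, hlen]
        simp
      rw [show ([((0 : Int) + ↑(rs.zip (rs.map (fun r => pvKey r.2))).length, (r, pvKey r.2))].filter
            (fun p => (((PySem.List.index? (rs.map (fun r => pvKey r.2) ++ [pvKey r.2]) p.2.2).map
              (fun n => (n : Int))) == some p.1)))
          = [((0 : Int) + ↑(rs.zip (rs.map (fun r => pvKey r.2))).length, (r, pvKey r.2))]
          from by rw [List.filter_cons]; rw [hpred]; rfl]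
      simp only [List.map_cons, List.map_nil]
      rfl

-- the first-occurrence map answers exactly what list.index answers
theorem pvFirst_getq (K : List String) :
    ∀ k, PySem.Dict.get? (pvFirst K) k
      = (PySem.List.index? K k).map (fun n => (n : Int)) := by
  induction K using List.reverseRecOn with
  | nil => intro k; rfl
  | append_singleton K k0 ih =>
    intro k
    have hF : pvFirst (K ++ [k0])
        = PySem.Dict.setdefault (pvFirst K) k0 ((0 : Int) + ↑K.length) := by
      unfold pvFirst
      rw [PySem.List.enumerate_append, PySem.List.enumerate_cons, PySem.List.enumerate_nil,
          List.foldl_append, List.foldl_cons, List.foldl_nil]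
    rw [hF]
    by_cases hk0 : k0 ∈ K
    · have hc : (pvFirst K).contains k0 = true := by
        have h1 : PySem.Dict.get? (pvFirst K) k0 ≠ none := by
          rw [ih k0]
          cases hx : PySem.List.index? K k0 with
          | none =>
            rw [PySem.List.index?_eq_none_iff] at hx
            exact absurd hk0 hx
          | some j => simp
        cases hcc : (pvFirst K).contains k0 with
        | false => exact absurd ((PySem.Dict.get?_eq_none_iff_contains _ _).mpr hcc) h1
        | true => rfl
      rw [show PySem.Dict.setdefault (pvFirst K) k0 ((0 : Int) + ↑K.length) = pvFirst K
          from by simp [PySem.Dict.setdefault, hc]]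
      by_cases hk : k ∈ K
      · rw [PySem.List.index?_append_of_mem [k0] hk, ih k]
      · have hne : PySem.List.index? (K ++ [k0]) k = none := by
          rw [PySem.List.index?_eq_none_iff]
          simp only [List.mem_append, List.mem_singleton]
          rintro (h | h)
          · exact hk h
          · rw [h] at hk; exact hk hk0
        have hnK : PySem.List.index? K k = none := by
          rw [PySem.List.index?_eq_none_iff]; exact hk
        rw [hne, ih k, hnK]
    · have h0 : PySem.Dict.get? (pvFirst K) k0 = none := by
        rw [ih k0, show PySem.List.index? K k0 = none
          from by rw [PySem.List.index?_eq_none_iff]; exact hk0]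
        rfl
      have hc : (pvFirst K).contains k0 = false :=
        (PySem.Dict.get?_eq_none_iff_contains _ _).mp h0
      rw [show PySem.Dict.setdefault (pvFirst K) k0 ((0 : Int) + ↑K.length)
          = (pvFirst K).insert k0 ((0 : Int) + ↑K.length)
          from by simp [PySem.Dict.setdefault, PySem.Dict.insert, hc]]
      by_cases hkk : k = k0
      · subst hkk
        rw [PySem.Dict.get?_insert_self, PySem.List.index?_append_singleton_self _ _ hk0]
        simp
      · rw [PySem.Dict.get?_insert_of_ne _ _ hkk]
        rw [ih k]
        by_cases hk : k ∈ K
        · rw [PySem.List.index?_append_of_mem [k0] hk]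
        · have hne : PySem.List.index? (K ++ [k0]) k = none := by
            rw [PySem.List.index?_eq_none_iff]
            simp only [List.mem_append, List.mem_singleton]
            rintro (h | h)
            · exact hk h
            · exact hkk h
          have hnK : PySem.List.index? K k = none := by
            rw [PySem.List.index?_eq_none_iff]; exact hk
          rw [hne, hnK]

-- B's dict-based selection is the list.index-based selection
theorem pvSelB_eq_selIdx (records : List (String × String)) :
    pvSelB records = pvSelIdx records := by
  simp only [pvSelB, pvSelIdx]
  congr 1
  apply List.filter_congr
  intro p _
  rw [show ((PySem.List.enumerate (records.map (fun r => pvKey r.2)) 0).foldl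
        (fun d p => PySem.Dict.setdefault d p.2 p.1) PySem.Dict.empty)
      = pvFirst (records.map (fun r => pvKey r.2)) from rfl,
     pvFirst_getq (records.map (fun r => pvKey r.2)) p.2.2]

-- ===== VERDICT (by name: the statement is the Claim_ definition above) =====
theorem remove_duplicate_sequences_spec : Claim_equal_remove_duplicate_sequences := by
  intro fasta_lines _
  unfold Spec_remove_duplicate_sequences
  have hA : remove_duplicate_sequences fasta_lines
      = ((pvRecsA fasta_lines).foldl pvDedupStep (PySem.Set.empty, [])).2 := rfl
  have hB : remove_duplicate_sequences_alt fasta_lines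
      = pvSelB ((pvRevRes fasta_lines).1.reverse) := rfl
  rw [hA, hB, pvRevRes_char,
      show ((pvRecsA fasta_lines).reverse, (pvTail fasta_lines).reverse).1
        = (pvRecsA fasta_lines).reverse from rfl,
      List.reverse_reverse, pvSelB_eq_selIdx, pvDedup_eq_selIdx]
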